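-- pv_equiv track=rewrite | github.com/asallam02/Enhancer | Models/Graphing/Metrics.py | clust
-- ===== SOURCE A (Python) =====
-- def clust(diff_locs, neigbour_dist):
--     """
--     Clusters indices where differences occur based on their proximity to each other
--
--     Inputs:
--         diff_locs - a list of np arrays containing all indices of differences above the alpha threshold, see compare fxn.
--         betas -  list of maximum distance apart two indices of difference can be while still considered in the same cluster
--
--     Outputs:
--         clusters - list of clusters. Each entry list follows the following format: [x,y]. Where
--             x is the starting index of the cluster (inclusive)
--             y is the ending index of the cluster (inclusive)
--     """
--     clusters = []
--
--     #take care of empty case.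
--     if len(diff_locs) == 0:
--         return []
--     else:
--         current_cluster = [diff_locs[0], diff_locs[0]]
--
--     for j in diff_locs:
--         if (j - current_cluster[1]) > neigbour_dist:
--             clusters.append(current_cluster)
--             current_cluster = [j,j]
--         else:
--             current_cluster[1] = j
--
--     clusters.append(current_cluster)
--     return clusters
-- ===== SOURCE B (Python) =====
-- def clust(diff_locs, neigbour_dist):
--     if len(diff_locs) == 0:
--         return []
--     # A compares every element with its predecessor (and the first element with
--     # itself), so prepend the first element and split uniformly at every gap
--     # above the threshold: first compute the breakpoint positions, then
--     # materialise each segment as [first, last].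
--     xs = [diff_locs[0]] + diff_locs
--     n = len(xs)
--     breaks = [i for i in range(1, n) if xs[i] - xs[i - 1] > neigbour_dist]
--     bounds = [0] + breaks + [n]
--     return [[xs[a], xs[b - 1]] for a, b in zip(bounds, bounds[1:])]
-- ===== Notes on version B (the rewrite author's own statement) =====
-- stated objective: alternative
-- what changed: B first computes the list of breakpoint positions (consecutive gaps above the threshold, with the first element compared to itself as A effectively does), then materialises each segment between breakpoints as [first, last], instead of threading a mutable current-cluster pair through a single accumulating pass.
import Mathlib
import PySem

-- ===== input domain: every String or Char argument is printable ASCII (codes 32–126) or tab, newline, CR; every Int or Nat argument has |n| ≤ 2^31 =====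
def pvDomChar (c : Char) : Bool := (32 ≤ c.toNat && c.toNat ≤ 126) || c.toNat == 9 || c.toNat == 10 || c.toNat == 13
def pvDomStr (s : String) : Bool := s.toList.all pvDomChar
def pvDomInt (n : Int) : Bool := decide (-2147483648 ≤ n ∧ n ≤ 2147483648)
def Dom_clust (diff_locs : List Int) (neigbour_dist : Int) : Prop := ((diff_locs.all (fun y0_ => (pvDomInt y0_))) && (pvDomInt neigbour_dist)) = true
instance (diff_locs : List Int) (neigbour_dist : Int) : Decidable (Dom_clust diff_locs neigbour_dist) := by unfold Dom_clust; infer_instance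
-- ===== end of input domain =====

-- B computes the breakpoint positions first and then materialises each segment as
-- [first, last], instead of threading a mutable current-cluster pair through one pass
-- (objective: alternative decomposition, same asymptotic cost).


-- ===== PORT A =====
-- Python A: one pass; `current_cluster` is a two-element list, modelled as an Int × Int pair.
def clust (diff_locs : List Int) (neigbour_dist : Int) : List (List Int) :=
  match diff_locs with
  | [] => []
  | d0 :: _ =>
    let st := diff_locs.foldl
      (fun (st : List (List Int) × Int × Int) j =>
        if j - st.2.2 > neigbour_dist then (st.1 ++ [[st.2.1, st.2.2]], j, j)
        else (st.1, st.2.1, j))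
      ([], d0, d0)
    st.1 ++ [[st.2.1, st.2.2]]

-- ===== PORT B =====
-- Port of Source B; list indices produced by range(1, n) and the breakpoint bounds are
-- always in range, so xs[i] is ported as pyGetD with an (unreachable) default 0;
-- bounds[1:] is the slice primitive.
def clust_alt (diff_locs : List Int) (neigbour_dist : Int) : List (List Int) :=
  match diff_locs with
  | [] => []
  | d0 :: _ =>
    let xs := d0 :: diff_locs
    let n : Int := xs.length
    let breaks := (PySem.List.pyRange 1 n 1).filter
      (fun i => PySem.List.pyGetD xs i 0 - PySem.List.pyGetD xs (i - 1) 0 > neigbour_dist)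
    let bounds := 0 :: (breaks ++ [n])
    (bounds.zip (PySem.List.slice bounds (some 1))).map
      (fun ab => [PySem.List.pyGetD xs ab.1 0, PySem.List.pyGetD xs (ab.2 - 1) 0])

-- ===== PRECONDITION & SPEC =====
def Spec_clust (diff_locs : List Int) (neigbour_dist : Int) (out : List (List Int)) : Prop := out = clust_alt diff_locs neigbour_dist
instance (diff_locs : List Int) (neigbour_dist : Int) (out : List (List Int)) : Decidable (Spec_clust diff_locs neigbour_dist out) := by unfold Spec_clust; infer_instance

-- ===== CLAIM (what is proved, stated in full; the proofs are below) =====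
def Claim_equal_clust : Prop := ∀ (diff_locs : List Int) (neigbour_dist : Int), Dom_clust diff_locs neigbour_dist → Spec_clust diff_locs neigbour_dist (clust diff_locs neigbour_dist)

-- ===== LEMMAS AND PROOFS =====

-- Common reference function: scan the remaining list, `s`/`p` = start/previous element
-- of the current cluster (A's current_cluster).
def goClust (nd s p : Int) : List Int → List (List Int)
  | [] => [[s, p]]
  | j :: l => if j - p > nd then [s, p] :: goClust nd j j l else goClust nd s j l

-- the body of clust_alt over an arbitrary xs
def bcore (nd : Int) (xs : List Int) : List (List Int) :=
  let n : Int := xs.length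
  let breaks := (PySem.List.pyRange 1 n 1).filter
    (fun i => PySem.List.pyGetD xs i 0 - PySem.List.pyGetD xs (i - 1) 0 > nd)
  let bounds := 0 :: (breaks ++ [n])
  (bounds.zip (PySem.List.slice bounds (some 1))).map
    (fun ab => [PySem.List.pyGetD xs ab.1 0, PySem.List.pyGetD xs (ab.2 - 1) 0])

def setStart (a : Int) : List (List Int) → List (List Int)
  | [] => []
  | c :: cs => (a :: c.tail) :: cs

-- ---- A side ----
theorem foldlA (nd : Int) (l : List Int) : ∀ (acc : List (List Int)) (s p : Int),
    (let st := l.foldl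
      (fun (st : List (List Int) × Int × Int) j =>
        if j - st.2.2 > nd then (st.1 ++ [[st.2.1, st.2.2]], j, j)
        else (st.1, st.2.1, j)) (acc, s, p)
     st.1 ++ [[st.2.1, st.2.2]]) = acc ++ goClust nd s p l := by
  induction l with
  | nil => intro acc s p; simp [goClust]
  | cons j l ih =>
    intro acc s p
    simp only [List.foldl_cons, goClust]
    by_cases h : j - p > nd
    · simp only [h, if_pos] at *
      simpa using ih (acc ++ [[s, p]]) j j
    · simp only [h, if_neg, not_false_iff] at *
      exact ih acc s j

theorem clust_eq_go (nd d : Int) (ds : List Int) :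
    clust (d :: ds) nd = goClust nd d d (d :: ds) := by
  simpa [clust] using foldlA nd (d :: ds) [] d d

-- ---- B side ----
theorem pyGetD_cons_shift (x : Int) (xs : List Int) (n : Int) (h : 0 ≤ n) :
    PySem.List.pyGetD (x :: xs) (n + 1) 0 = PySem.List.pyGetD xs n 0 := by
  rw [PySem.List.pyGetD, PySem.List.pyGetD,
      PySem.List.pyGet?_of_nonneg (x :: xs) (show (0:Int) ≤ n + 1 by omega),
      PySem.List.pyGet?_of_nonneg xs h, show (n + 1).toNat = n.toNat + 1 by omega]
  simp

theorem pyRange_shift (a b : Int) :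
    PySem.List.pyRange (a + 1) (b + 1) 1 = (PySem.List.pyRange a b 1).map (· + 1) := by
  rw [PySem.List.pyRange_one, PySem.List.pyRange_one, show b + 1 - (a + 1) = b - a by ring,
      List.map_map]
  exact List.map_congr_left (fun k _ => by simp; ring)

theorem shifted_pairs (x : Int) (ys L : List Int)
    (h1 : ∀ a ∈ L, 0 ≤ a) (h2 : ∀ b ∈ L.tail, 1 ≤ b) :
    ((L.map (· + 1)).zip ((L.map (· + 1)).tail)).map
      (fun ab => [PySem.List.pyGetD (x :: ys) ab.1 0, PySem.List.pyGetD (x :: ys) (ab.2 - 1) 0])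
    = (L.zip L.tail).map
      (fun ab => [PySem.List.pyGetD ys ab.1 0, PySem.List.pyGetD ys (ab.2 - 1) 0]) := by
  rw [show (L.map (· + 1)).tail = L.tail.map (· + 1) by
        cases L <;> simp, List.zip_map, List.map_map]
  refine List.map_congr_left (fun ab hab => ?_)
  obtain ⟨ha, hb⟩ := List.of_mem_zip (a := ab.1) (b := ab.2) (by simpa using hab)
  have ha0 : 0 ≤ ab.1 := h1 _ ha
  have hb1 : 1 ≤ ab.2 := h2 _ hb
  simp only [Prod.map, Function.comp]
  rw [pyGetD_cons_shift x ys ab.1 ha0,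
      show ab.2 + 1 - 1 = (ab.2 - 1) + 1 by ring,
      pyGetD_cons_shift x ys (ab.2 - 1) (by omega)]

theorem bcore_single (nd x : Int) : bcore nd [x] = [[x, x]] := by
  simp [bcore, PySem.List.pyRange_one_eq_nil (by norm_num : (1:Int) ≤ 1),
        PySem.List.slice_from _ (by norm_num : (0:Int) ≤ 1)]

theorem breaks_cons (nd x j : Int) (r : List Int) :
    (PySem.List.pyRange 1 ((x :: j :: r).length : Int) 1).filter
        (fun i => PySem.List.pyGetD (x :: j :: r) i 0 - PySem.List.pyGetD (x :: j :: r) (i - 1) 0 > nd)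
    = (if j - x > nd then [(1:Int)] else [])
      ++ ((PySem.List.pyRange 1 ((j :: r).length : Int) 1).filter
          (fun i => PySem.List.pyGetD (j :: r) i 0 - PySem.List.pyGetD (j :: r) (i - 1) 0 > nd)).map (· + 1) := by
  have hm : (1:Int) ≤ ((j :: r).length : Int) := by simp
  have hlen : ((x :: j :: r).length : Int) = ((j :: r).length : Int) + 1 := by
    push_cast [List.length_cons]; ring
  rw [hlen, PySem.List.pyRange_one_cons (by omega),
      pyRange_shift 1 ((j :: r).length : Int),
      List.filter_cons, List.filter_map]
  have e1 : PySem.List.pyGetD (x :: j :: r) 1 0 = j := by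
    rw [show (1:Int) = 0 + 1 by norm_num, pyGetD_cons_shift _ _ _ le_rfl,
        PySem.List.pyGetD_zero_cons]
  have e0 : PySem.List.pyGetD (x :: j :: r) (1 - 1) 0 = x := by
    norm_num [PySem.List.pyGetD_zero_cons]
  have tl : List.filter
      ((fun i => decide (PySem.List.pyGetD (x :: j :: r) i 0 - PySem.List.pyGetD (x :: j :: r) (i - 1) 0 > nd)) ∘
        fun y => y + 1)
      (PySem.List.pyRange 1 ((j :: r).length : Int)) =
    List.filter (fun i => decide (PySem.List.pyGetD (j :: r) i 0 - PySem.List.pyGetD (j :: r) (i - 1) 0 > nd))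
      (PySem.List.pyRange 1 ((j :: r).length : Int)) := by
    apply List.filter_congr; intro i hi
    have h1 : 1 ≤ i := (PySem.List.mem_pyRange_one.mp hi).1
    simp only [Function.comp_apply, decide_eq_decide]
    rw [pyGetD_cons_shift x (j :: r) i (by omega), show i + 1 - 1 = (i - 1) + 1 by ring,
        pyGetD_cons_shift x (j :: r) (i - 1) (by omega)]
  rw [tl, e1, e0]
  by_cases h : j - x > nd <;> simp [h]


theorem bcore_cons (nd x j : Int) (r : List Int) :
    bcore nd (x :: j :: r) =
      if j - x > nd then [x, x] :: bcore nd (j :: r) else setStart x (bcore nd (j :: r)) := by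
  simp only [bcore]
  rw [breaks_cons nd x j r, PySem.List.slice_from _ (by norm_num : (0:Int) ≤ 1),
      PySem.List.slice_from _ (by norm_num : (0:Int) ≤ 1)]
  set M : Int := ((j :: r).length : Int) with hM
  set B := (PySem.List.pyRange 1 M 1).filter
      (fun i => decide (PySem.List.pyGetD (j :: r) i 0 - PySem.List.pyGetD (j :: r) (i - 1) 0 > nd)) with hB
  have hM1 : (1:Int) ≤ M := by simp [hM]
  rw [show ((x :: j :: r).length : Int) = M + 1 by simp [hM],
      show Int.toNat 1 = 1 from rfl]
  have hBmem : ∀ b ∈ B, 1 ≤ b := by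
    intro b hb
    exact (PySem.List.mem_pyRange_one.mp (List.mem_filter.mp hb).1).1
  have hLL : ∀ b ∈ B ++ [M], 1 ≤ b := by
    intro b hb
    rcases List.mem_append.mp hb with h | h
    · exact hBmem b h
    · simp at h; omega
  have e0 : PySem.List.pyGetD (x :: j :: r) (1 - 1) 0 = x := by
    norm_num [PySem.List.pyGetD_zero_cons]
  by_cases h : j - x > nd
  · -- break at the front: first cluster is [x, x]
    simp only [h, if_pos]
    have e : (([(1:Int)] ++ B.map (· + 1)) ++ [M + 1]) = ((0 :: (B ++ [M])).map (· + 1)) := by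
      simp
    rw [e]
    have key := shifted_pairs x (j :: r) (0 :: (B ++ [M]))
      (by intro a ha; rcases List.mem_cons.mp ha with h' | h'; · omega
          · have := hLL a h'; omega)
      (by intro b hb; exact hLL b hb)
    simp only [List.map_cons, zero_add, List.tail_cons, List.drop_succ_cons, List.drop_zero] at key ⊢
    rw [List.zip_cons_cons, List.map_cons, key, PySem.List.pyGetD_zero_cons, e0]
  · -- no break: extend the first cluster of bcore (j :: r) to start at x
    simp only [h, if_neg, not_false_iff, List.nil_append]
    obtain ⟨b0, t, hsplit⟩ : ∃ b0 t, B ++ [M] = b0 :: t := by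
      cases B with
      | nil => exact ⟨M, [], rfl⟩
      | cons a l => exact ⟨a, l ++ [M], rfl⟩
    have hb0 : 1 ≤ b0 := hLL b0 (by rw [hsplit]; exact List.mem_cons_self)
    have e : (B.map (· + 1) ++ [M + 1]) = ((b0 :: t).map (· + 1)) := by
      rw [← hsplit]; simp
    have key := shifted_pairs x (j :: r) (b0 :: t)
      (by intro a ha; have := hLL a (hsplit ▸ ha); omega)
      (by intro b hb; exact hLL b (hsplit ▸ List.mem_cons_of_mem b0 hb))
    simp only [List.map_cons, List.tail_cons] at key
    rw [e]
    simp only [List.map_cons, List.drop_succ_cons, List.drop_zero, hsplit, List.zip_cons_cons,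
               List.map_cons, setStart, key]
    rw [PySem.List.pyGetD_zero_cons, show b0 + 1 - 1 = (b0 - 1) + 1 by ring,
        pyGetD_cons_shift x (j :: r) (b0 - 1) (by omega)]
    simp

theorem setStart_go (nd a s p : Int) (l : List Int) :
    setStart a (goClust nd s p l) = goClust nd a p l := by
  induction l generalizing s p with
  | nil => simp [goClust, setStart]
  | cons j l ih =>
    by_cases h : j - p > nd
    · simp [goClust, h, setStart]
    · simp [goClust, h, ih]

theorem bcore_eq_go (nd : Int) : ∀ (ys : List Int) (x : Int), bcore nd (x :: ys) = goClust nd x x ys := by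
  intro ys
  induction ys with
  | nil => intro x; simpa [goClust] using bcore_single nd x
  | cons j r ih =>
    intro x
    rw [bcore_cons]
    by_cases h : j - x > nd
    · simp [h, goClust, ih j]
    · simp [h, goClust, ih j, setStart_go]

-- ===== VERDICT (by name: the statement is the Claim_ definition above) =====
theorem clust_spec : Claim_equal_clust := by
  intro diff_locs neigbour_dist _
  unfold Spec_clust
  cases diff_locs with
  | nil => rfl
  | cons d ds =>
    have hB : clust_alt (d :: ds) neigbour_dist = bcore neigbour_dist (d :: d :: ds) := rfl
    rw [clust_eq_go, hB, bcore_eq_go]
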